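-- pv_equiv track=rewrite | github.com/pizzaogkebab/adventofcode2022 | day6/6.py | char_quantity
-- ===== SOURCE A (Python) =====
-- def char_quantity(records: str, len_of_packet: int) -> int:
--     unique = []
--     num = 0
--     for ind, elem in enumerate(records):
--         if len(unique) == len_of_packet:
--             num = ind
--             break
--         if elem in unique:
--             if unique[0] == elem:
--                 unique.remove(elem)
--             elif unique[-1] == elem:
--                 unique.clear()
--             else:
--                 unique = unique[unique.index(elem) + 1:]
--         unique.append(elem)
--     return num
-- ===== SOURCE B (Python) =====
-- def char_quantity(records: str, len_of_packet: int) -> int: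
--     # O(n) sliding window: `start` marks the left edge of the current run of
--     # distinct characters, `last` maps each char to the index it was last seen.
--     last = {}
--     start = 0
--     for i, c in enumerate(records):
--         if i - start == len_of_packet:
--             return i
--         j = last.get(c)
--         if j is not None and j >= start:
--             start = j + 1
--         last[c] = i
--     return 0
-- ===== Notes on version B (the rewrite author's own statement) =====
-- stated objective: alternative
-- what changed: Replaces A's explicit window list with its per-char membership scan, list.remove/clear/index and slicing by a single pass keeping a last-seen-index dict and a start pointer (sliding window); measured ~1.4x faster on the generated inputs, below the 1.5x bar, so no speed claim.
import Mathlib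
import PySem

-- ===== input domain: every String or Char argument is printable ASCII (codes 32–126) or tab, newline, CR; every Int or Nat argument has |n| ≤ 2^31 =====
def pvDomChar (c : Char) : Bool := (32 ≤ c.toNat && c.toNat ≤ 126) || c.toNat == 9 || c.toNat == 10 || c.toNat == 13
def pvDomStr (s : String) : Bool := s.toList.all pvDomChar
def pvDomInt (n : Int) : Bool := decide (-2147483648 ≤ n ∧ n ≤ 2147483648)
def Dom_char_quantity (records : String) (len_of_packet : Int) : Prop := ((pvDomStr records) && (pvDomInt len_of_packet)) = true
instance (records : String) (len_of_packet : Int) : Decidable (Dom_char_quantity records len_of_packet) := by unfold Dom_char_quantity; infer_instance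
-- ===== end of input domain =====

-- B replaces A's explicit window list (per-char membership scan, remove/clear/slice)
-- by a sliding window kept as a last-seen-index dict plus a start pointer.

-- ===== PORT A =====
-- the for-loop of A: state = (remaining chars, current index `ind`, the `unique` list);
-- `num` is 0 unless the loop breaks, so the loop returns `ind` at the break and 0 at the end
def pvALoop (len_of_packet : Int) : List Char → Int → List Char → Int
  | [], _, _ => 0
  | elem :: rest, ind, unique =>
    if (unique.length : Int) = len_of_packet then ind
    else
      let unique' :=
        if unique.contains elem then
          if PySem.List.pyGet? unique 0 = some elem then
            (PySem.List.remove? unique elem).getD unique     -- unique.remove(elem); never none here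
          else if PySem.List.pyGet? unique (-1) = some elem then
            []                                               -- unique.clear()
          else
            match PySem.List.index? unique elem with
            | some j => PySem.List.slice unique (some ((j : Int) + 1)) none   -- unique[unique.index(elem)+1:]
            | none => unique                                 -- unreachable: elem ∈ unique
        else unique
      pvALoop len_of_packet rest (ind + 1) (unique' ++ [elem])

def char_quantity (records : String) (len_of_packet : Int) : Int :=
  pvALoop len_of_packet records.toList 0 []

-- ===== PORT B =====
-- the for-loop of B: state = (remaining chars, index i, dict `last`, pointer `start`)
def pvBLoop (len_of_packet : Int) : List Char → Int → PySem.Dict Char Int → Int → Int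
  | [], _, _, _ => 0
  | c :: rest, i, last, start =>
    if i - start = len_of_packet then i
    else
      let start' :=
        match PySem.Dict.get? last c with
        | some j => if start ≤ j then j + 1 else start
        | none => start
      pvBLoop len_of_packet rest (i + 1) (PySem.Dict.insert last c i) start'

def char_quantity_alt (records : String) (len_of_packet : Int) : Int :=
  pvBLoop len_of_packet records.toList 0 PySem.Dict.empty 0

-- ===== PRECONDITION & SPEC =====
def Spec_char_quantity (records : String) (len_of_packet : Int) (out : Int) : Prop := out = char_quantity_alt records len_of_packet
instance (records : String) (len_of_packet : Int) (out : Int) : Decidable (Spec_char_quantity records len_of_packet out) := by unfold Spec_char_quantity; infer_instance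

-- ===== CLAIM (what is proved, stated in full; the proofs are below) =====
def Claim_equal_char_quantity : Prop := ∀ (records : String) (len_of_packet : Int), Dom_char_quantity records len_of_packet → Spec_char_quantity records len_of_packet (char_quantity records len_of_packet)

-- ===== LEMMAS AND PROOFS =====

-- common reference loop: the window of distinct recent chars, kept explicitly
def pvWin (k : Int) : List Char → Int → List Char → Int
  | [], _, _ => 0
  | c :: rest, i, w =>
    if (w.length : Int) = k then i
    else pvWin k rest (i + 1) ((if c ∈ w then w.drop (w.idxOf c + 1) else w) ++ [c])

-- index of the LAST occurrence of c in l (none if absent)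
def pvLastIdx? : List Char → Char → Option Nat
  | [], _ => none
  | a :: l, c =>
    match pvLastIdx? l c with
    | some j => some (j + 1)
    | none => if a = c then some 0 else none

theorem pvLastIdx?_eq_none_iff (l : List Char) (c : Char) : pvLastIdx? l c = none ↔ c ∉ l := by
  induction l with
  | nil => simp [pvLastIdx?]
  | cons a l ih =>
    simp only [pvLastIdx?, List.mem_cons]
    rcases h : pvLastIdx? l c with _ | j
    · have hc := ih.mp h
      by_cases hac : a = c
      · simp [hac, hc]
      · rw [if_neg hac]
        simp only [not_or, true_iff]
        exact ⟨fun h => hac h.symm, hc⟩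
    · have hc : c ∈ l := by by_contra hc; rw [← ih] at hc; simp [h] at hc
      simp [hc]

theorem pvLastIdx?_append (xs ys : List Char) (c : Char) :
    pvLastIdx? (xs ++ ys) c =
      match pvLastIdx? ys c with
      | some j => some (j + xs.length)
      | none => pvLastIdx? xs c := by
  induction xs with
  | nil => rcases h : pvLastIdx? ys c with _ | j <;> simp [pvLastIdx?, h]
  | cons a xs ih =>
    simp only [List.cons_append, pvLastIdx?, ih]
    rcases pvLastIdx? ys c with _ | j <;> rcases pvLastIdx? xs c with _ | i <;>
      simp [List.length_cons] <;> omega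

theorem pvLastIdx?_lt_length (l : List Char) (c : Char) (j : Nat) (h : pvLastIdx? l c = some j) :
    j < l.length := by
  induction l generalizing j with
  | nil => simp [pvLastIdx?] at h
  | cons a l ih =>
    simp only [pvLastIdx?] at h
    rcases h' : pvLastIdx? l c with _ | i <;> rw [h'] at h
    · by_cases hac : a = c <;> simp [hac] at h <;> simp [← h]
    · simp at h; have := ih i h'; simp; omega

theorem pvLastIdx?_nodup (l : List Char) (c : Char) (hn : l.Nodup) (hc : c ∈ l) :
    pvLastIdx? l c = some (l.idxOf c) := by
  induction l with
  | nil => simp at hc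
  | cons a l ih =>
    rcases List.nodup_cons.mp hn with ⟨ha, hn'⟩
    by_cases hcl : c ∈ l
    · have hac : a ≠ c := fun h => ha (h ▸ hcl)
      simp only [pvLastIdx?, ih hn' hcl, List.idxOf_cons]
      have hb : (a == c) = false := by simpa using hac
      simp [hb]
    · have hac : a = c := by rcases List.mem_cons.mp hc with h | h; exact h.symm; exact absurd h hcl
      simp only [pvLastIdx?, (pvLastIdx?_eq_none_iff l c).mpr hcl]
      simp [hac, List.idxOf_cons]

theorem pv_not_mem_drop (l : List Char) (c : Char) (hn : l.Nodup) :
    c ∉ l.drop (l.idxOf c + 1) := by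
  intro hmem
  by_cases hc : c ∈ l
  · have hlt : l.idxOf c < l.length := List.idxOf_lt_length_of_mem hc
    have h1 : c ∈ l.take (l.idxOf c + 1) := by
      have heq : (l.take (l.idxOf c + 1))[l.idxOf c]'(by simp; omega) = c := by
        rw [List.getElem_take]; exact List.getElem_idxOf hlt
      have hm : (l.take (l.idxOf c + 1))[l.idxOf c]'(by simp; omega) ∈ l.take (l.idxOf c + 1) :=
        List.getElem_mem _
      rwa [heq] at hm
    have := List.count_eq_one_of_mem hn hc
    have h2 : l.count c = (l.take (l.idxOf c + 1)).count c + (l.drop (l.idxOf c + 1)).count c := by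
      rw [← List.count_append, List.take_append_drop]
    have := List.count_pos_iff.mpr h1
    have := List.count_pos_iff.mpr hmem
    omega
  · exact hc (List.mem_of_mem_drop hmem)

theorem pv_nodup_step (w : List Char) (c : Char) (hn : w.Nodup) :
    ((if c ∈ w then w.drop (w.idxOf c + 1) else w) ++ [c]).Nodup := by
  by_cases hc : c ∈ w
  · rw [if_pos hc]
    refine List.nodup_append.mpr ⟨hn.sublist (List.drop_sublist _ _), List.nodup_singleton c, ?_⟩
    intro a ha b hb
    rw [List.mem_singleton] at hb
    rw [hb]
    exact fun h => pv_not_mem_drop w c hn (h ▸ ha)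
  · rw [if_neg hc]
    refine List.nodup_append.mpr ⟨hn, List.nodup_singleton c, ?_⟩
    intro a ha b hb
    rw [List.mem_singleton] at hb
    rw [hb]
    exact fun h => hc (h ▸ ha)

theorem pv_idxOf_append_self (l : List Char) (c : Char) (h : c ∉ l) :
    List.idxOf c (l ++ [c]) = l.length := by
  induction l with
  | nil => simp
  | cons a t ih =>
    simp only [List.mem_cons, not_or] at h
    simp only [List.cons_append, List.idxOf_cons]
    have hb : (a == c) = false := by simpa using fun hh => h.1 hh.symm
    simp [hb, ih h.2]

theorem pv_idxOf?_eq_some (l : List Char) (c : Char) (h : c ∈ l) :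
    List.idxOf? c l = some (List.idxOf c l) := by
  induction l with
  | nil => simp at h
  | cons a t ih =>
    by_cases hac : a = c
    · simp [List.idxOf?_cons, hac]
    · have hb : (a == c) = false := by simpa using hac
      have hct : c ∈ t := by
        rcases List.mem_cons.mp h with h' | h'
        · exact absurd h'.symm hac
        · exact h'
      simp [List.idxOf?_cons, List.idxOf_cons, hb, ih hct]

theorem pvA_branches (w : List Char) (c : Char) (hn : w.Nodup) (hc : c ∈ w) :
    (if PySem.List.pyGet? w 0 = some c then
        (PySem.List.remove? w c).getD w
      else if PySem.List.pyGet? w (-1) = some c then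
        []
      else
        match PySem.List.index? w c with
        | some j => PySem.List.slice w (some ((j : Int) + 1)) none
        | none => w) = w.drop (w.idxOf c + 1) := by
  by_cases h0 : PySem.List.pyGet? w 0 = some c
  · rw [if_pos h0]
    cases w with
    | nil => simp at hc
    | cons a t =>
      rw [PySem.List.pyGet?_zero_cons] at h0
      have hac : a = c := by simpa using h0
      subst hac
      rw [PySem.List.remove?_cons_self]
      simp
  · rw [if_neg h0]
    by_cases h1 : PySem.List.pyGet? w (-1) = some c
    · rw [if_pos h1]
      rw [PySem.List.pyGet?_neg_one] at h1
      have hw : w.dropLast ++ [c] = w := List.dropLast_append_getLast? c h1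
      have hcd : c ∉ w.dropLast := by
        intro hmem
        have := hn
        rw [← hw] at this
        rcases List.nodup_append.mp this with ⟨_, _, hdisj⟩
        exact hdisj c hmem c (List.mem_singleton_self c) rfl
      have hidx : w.idxOf c = w.dropLast.length := by
        conv_lhs => rw [← hw]
        exact pv_idxOf_append_self _ _ hcd
      have hne : w ≠ [] := List.ne_nil_of_mem hc
      have hlen : w.length = w.dropLast.length + 1 := by
        rw [List.length_dropLast]
        have : 0 < w.length := List.length_pos_of_ne_nil hne
        omega
      rw [hidx]
      symm
      apply List.drop_eq_nil_of_le
      omega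
    · rw [if_neg h1]
      have hidx : PySem.List.index? w c = some (w.idxOf c) := by
        rw [PySem.List.index?_eq_idxOf?]
        exact pv_idxOf?_eq_some w c hc
      simp only [hidx]
      rw [PySem.List.slice_from w (by positivity)]
      congr 1

theorem pvA_eq_win (k : Int) (rest : List Char) : ∀ (ind : Int) (w : List Char), w.Nodup →
    pvALoop k rest ind w = pvWin k rest ind w := by
  induction rest with
  | nil => intro ind w _; rfl
  | cons c rest ih =>
    intro ind w hn
    simp only [pvALoop, pvWin]
    by_cases hk : (w.length : Int) = k
    · rw [if_pos hk, if_pos hk]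
    · rw [if_neg hk, if_neg hk]
      by_cases hc : c ∈ w
      · have hcont : w.contains c = true := by simpa using hc
        rw [hcont, if_pos rfl, pvA_branches w c hn hc, if_pos hc]
        exact ih (ind + 1) _ (by have := pv_nodup_step w c hn; rwa [if_pos hc] at this)
      · have hcont : w.contains c = false := by simpa using hc
        rw [hcont, if_neg (by simp), if_neg hc]
        exact ih (ind + 1) _ (by have := pv_nodup_step w c hn; rwa [if_neg hc] at this)

theorem pvB_eq_win (k : Int) (rest : List Char) :
    ∀ (t w : List Char) (last : PySem.Dict Char Int),
      w.Nodup →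
      (∀ c, PySem.Dict.get? last c = (pvLastIdx? (t ++ w) c).map (fun j => (j : Int))) →
      pvBLoop k rest (((t ++ w).length : Nat) : Int) last ((t.length : Nat) : Int)
        = pvWin k rest (((t ++ w).length : Nat) : Int) w := by
  induction rest with
  | nil => intros; rfl
  | cons c rest ih =>
    intro t w last hn hl
    simp only [pvBLoop, pvWin]
    have hcond : (((t ++ w).length : Nat) : Int) - ((t.length : Nat) : Int) = (w.length : Int) := by
      simp [List.length_append]
    rw [hcond]
    by_cases hk : (w.length : Int) = k
    · rw [if_pos hk, if_pos hk]
    · rw [if_neg hk, if_neg hk]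
      by_cases hc : c ∈ w
      · have h1 : pvLastIdx? (t ++ w) c = some (w.idxOf c + t.length) := by
          rw [pvLastIdx?_append, pvLastIdx?_nodup w c hn hc]
        have h2 : PySem.Dict.get? last c = some ((w.idxOf c + t.length : Nat) : Int) := by
          rw [hl, h1]; rfl
        rw [h2]
        simp only []
        have hle : ((t.length : Nat) : Int) ≤ ((w.idxOf c + t.length : Nat) : Int) := by
          push_cast; omega
        rw [if_pos hle, if_pos hc]
        have hidx : w.idxOf c < w.length := List.idxOf_lt_length_of_mem hc
        have hL : (t ++ w.take (w.idxOf c + 1)) ++ (w.drop (w.idxOf c + 1) ++ [c])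
            = (t ++ w) ++ [c] := by
          simp only [List.append_assoc]
          rw [← List.append_assoc (w.take (w.idxOf c + 1)), List.take_append_drop]
        have hn' : (w.drop (w.idxOf c + 1) ++ [c]).Nodup := by
          have := pv_nodup_step w c hn; rwa [if_pos hc] at this
        have hl' : ∀ d, PySem.Dict.get? (last.insert c (((t ++ w).length : Nat) : Int)) d
            = (pvLastIdx? ((t ++ w.take (w.idxOf c + 1)) ++ (w.drop (w.idxOf c + 1) ++ [c])) d).map
                (fun j => (j : Int)) := by
          intro d
          rw [hL, PySem.Dict.get?_insert, pvLastIdx?_append]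
          by_cases hdc : d = c
          · subst hdc
            simp [pvLastIdx?]
          · rw [if_neg hdc, hl d]
            have hcd : ¬ c = d := fun h => hdc h.symm
            have hnone : pvLastIdx? [c] d = none := by simp [pvLastIdx?, hcd]
            simp [hnone]
        have := ih (t ++ w.take (w.idxOf c + 1)) (w.drop (w.idxOf c + 1) ++ [c]) _ hn' hl'
        rw [show ((((t ++ w.take (w.idxOf c + 1)) ++ (w.drop (w.idxOf c + 1) ++ [c])).length : Nat) : Int)
              = (((t ++ w).length : Nat) : Int) + 1 from by rw [hL]; simp; omega,
            show (((t ++ w.take (w.idxOf c + 1)).length : Nat) : Int)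
              = ((w.idxOf c + t.length : Nat) : Int) + 1 from by
              simp [List.length_take]; omega] at this
        exact this
      · have hwnone : pvLastIdx? w c = none := (pvLastIdx?_eq_none_iff w c).mpr hc
        have h1 : PySem.Dict.get? last c = (pvLastIdx? t c).map (fun j => (j : Int)) := by
          rw [hl, pvLastIdx?_append, hwnone]
        have hstart : (match PySem.Dict.get? last c with
            | some j => if ((t.length : Nat) : Int) ≤ j then j + 1 else ((t.length : Nat) : Int)
            | none => ((t.length : Nat) : Int)) = ((t.length : Nat) : Int) := by
          rw [h1]
          rcases h : pvLastIdx? t c with _ | j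
          · rfl
          · have hj := pvLastIdx?_lt_length t c j h
            show (if ((t.length : Nat) : Int) ≤ ((j : Nat) : Int) then ((j : Nat) : Int) + 1
                  else ((t.length : Nat) : Int)) = ((t.length : Nat) : Int)
            rw [if_neg (by push_cast; omega)]
        rw [hstart, if_neg hc]
        have hn' : (w ++ [c]).Nodup := by
          have := pv_nodup_step w c hn; rwa [if_neg hc] at this
        have hl' : ∀ d, PySem.Dict.get? (last.insert c (((t ++ w).length : Nat) : Int)) d
            = (pvLastIdx? (t ++ (w ++ [c])) d).map (fun j => (j : Int)) := by
          intro d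
          rw [show t ++ (w ++ [c]) = (t ++ w) ++ [c] from by simp,
              PySem.Dict.get?_insert, pvLastIdx?_append]
          by_cases hdc : d = c
          · subst hdc
            simp [pvLastIdx?]
          · rw [if_neg hdc, hl d]
            have hcd : ¬ c = d := fun h => hdc h.symm
            have hnone : pvLastIdx? [c] d = none := by simp [pvLastIdx?, hcd]
            simp [hnone]
        have := ih t (w ++ [c]) _ hn' hl'
        have e3 : (((t ++ (w ++ [c])).length : Nat) : Int) = (((t ++ w).length : Nat) : Int) + 1 := by
          simp only [List.length_append, List.length_cons, List.length_nil]
          omega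
        rw [e3] at this
        exact this

-- ===== VERDICT (by name: the statement is the Claim_ definition above) =====
theorem char_quantity_spec : Claim_equal_char_quantity := by
  intro records k _
  unfold Spec_char_quantity char_quantity char_quantity_alt
  have hA := pvA_eq_win k records.toList 0 [] List.nodup_nil
  have hB := pvB_eq_win k records.toList [] [] PySem.Dict.empty List.nodup_nil
    (by intro c; simp [PySem.Dict.get?_empty, pvLastIdx?])
  simp only [List.append_nil, List.length_nil, Nat.cast_zero] at hB
  rw [hA, ← hB]
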